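-- pv_equiv track=rewrite | github.com/6210qwe/leetcode_py | leetcode_solutions/by_id/q3845.py | maximum_sum_of_edge_values
-- ===== SOURCE A (Python) =====
-- from typing import List, Optional
--
-- def maximum_sum_of_edge_values(n: int, edges: List[List[int]]) -> int:
--     """
--     函数式接口 - 实现最优解法
--     """
--     # 计算每个节点的度数
--     degree = [0] * n
--     for u, v in edges:
--         degree[u] += 1
--         degree[v] += 1
--
--     # 将节点按度数从小到大排序
--     nodes = sorted(range(n), key=lambda x: degree[x])
--
--     # 将最大的值分配给度数最小的节点
--     values = list(range(1, n + 1))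
--     node_values = [0] * n
--     for i, node in enumerate(nodes):
--         node_values[node] = values[i]
--
--     # 计算所有边的值并返回总和
--     total_sum = 0
--     for u, v in edges:
--         total_sum += node_values[u] * node_values[v]
--
--     return total_sum
-- ===== SOURCE B (Python) =====
-- def maximum_sum_of_edge_values(n, edges):
--     # Rank-by-counting: never sorts or orders the nodes at all. A node's value
--     # is computed arithmetically as 1 + (#nodes of strictly smaller degree)
--     # + (#lower-indexed nodes of equal degree), via a degree histogram whose
--     # exclusive prefix sums give each degree class its first rank.
--     degree = [0] * n
--     for u, v in edges:
--         degree[u] += 1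
--         degree[v] += 1
--     hist = [0] * (2 * len(edges) + 1)
--     for d in degree:
--         hist[d] += 1
--     next_rank = [0] * (2 * len(edges) + 1)
--     run = 1
--     for d, c in enumerate(hist):
--         next_rank[d] = run
--         run += c
--     val = [0] * n
--     for v in range(n):
--         val[v] = next_rank[degree[v]]
--         next_rank[degree[v]] += 1
--     return sum(val[u] * val[v] for u, v in edges)
-- ===== Notes on version B (the rewrite author's own statement) =====
-- stated objective: alternative
-- what changed: B never sorts or orders the nodes at all: instead of A's sorted permutation scattered into node_values, B computes each node's value arithmetically as 1 + (#nodes of smaller degree) + (#lower-indexed nodes of equal degree), using a degree histogram and its exclusive prefix sums, then sums edge products.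
import Mathlib
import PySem

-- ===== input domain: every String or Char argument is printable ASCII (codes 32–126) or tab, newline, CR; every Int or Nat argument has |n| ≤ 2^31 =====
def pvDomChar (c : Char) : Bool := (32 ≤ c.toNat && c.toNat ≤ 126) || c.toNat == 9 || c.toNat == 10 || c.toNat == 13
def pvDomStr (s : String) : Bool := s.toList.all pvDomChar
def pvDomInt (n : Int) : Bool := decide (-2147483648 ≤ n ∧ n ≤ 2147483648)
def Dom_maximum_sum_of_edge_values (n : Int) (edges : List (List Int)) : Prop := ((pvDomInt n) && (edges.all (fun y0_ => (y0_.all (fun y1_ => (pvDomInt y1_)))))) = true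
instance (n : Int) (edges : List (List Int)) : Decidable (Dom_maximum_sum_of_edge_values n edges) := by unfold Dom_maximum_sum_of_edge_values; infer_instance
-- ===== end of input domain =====

-- B never orders the nodes: instead of A's stable sort plus permutation scatter, it computes
-- each node's value arithmetically from a degree histogram and its exclusive prefix sums
-- (objective: alternative algorithm, same result).

-- ===== PORT A =====
-- Python list index for 'degree[i] += 1': exact for -len ≤ i < len (guaranteed by Pre_)
def pvIdx (n i : Int) : Nat := (if i < 0 then i + n else i).toNat
-- 'degree[i] += 1'
def pvBump (n : Int) (d : List Int) (i : Int) : List Int :=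
  d.set (pvIdx n i) (d.getD (pvIdx n i) 0 + 1)
-- the degree-counting loop (this loop is identical in A's and in B's Python)
def pvDeg (n : Int) (edges : List (List Int)) : List Int :=
  edges.foldl (fun d e => pvBump n (pvBump n d (e.getD 0 0)) (e.getD 1 0)) (List.replicate n.toNat 0)
-- 'degree[x]' for 0 ≤ x < n (a lookup both Pythons perform)
def pvKey (n : Int) (edges : List (List Int)) (x : Int) : Int :=
  PySem.List.pyGetD (pvDeg n edges) x 0

-- nodes = sorted(range(n), key=lambda x: degree[x])
def pvNodes (n : Int) (edges : List (List Int)) : List Int :=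
  PySem.List.sorted (PySem.List.pyRange 0 n 1) (pvKey n edges) false
-- values = list(range(1, n + 1))
def pvValues (n : Int) : List Int := PySem.List.pyRange 1 (n + 1) 1
-- for i, node in enumerate(nodes): node_values[node] = values[i]
def pvNodeValues (n : Int) (edges : List (List Int)) : List Int :=
  (PySem.List.enumerate (pvNodes n edges)).foldl
    (fun nv p => nv.set p.2.toNat (PySem.List.pyGetD (pvValues n) p.1 0))
    (List.replicate n.toNat 0)

def maximum_sum_of_edge_values (n : Int) (edges : List (List Int)) : Int :=
  edges.foldl
    (fun s e => s + PySem.List.pyGetD (pvNodeValues n edges) (e.getD 0 0) 0 *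
                    PySem.List.pyGetD (pvNodeValues n edges) (e.getD 1 0) 0) 0

-- ===== PORT B =====
-- hist = [0]*(2*len(edges)+1); for d in degree: hist[d] += 1
-- (degree entries are ≥ 0 and ≤ 2*len(edges), so Python's plain index is List.set/getD at d.toNat)
def pvHist (n : Int) (edges : List (List Int)) : List Int :=
  (pvDeg n edges).foldl (fun h d => h.set d.toNat (h.getD d.toNat 0 + 1))
    (List.replicate (2 * edges.length + 1) 0)
-- next_rank = [0]*(2*len(edges)+1); run = 1; for d, c in enumerate(hist): next_rank[d] = run; run += c
def pvNextRank (n : Int) (edges : List (List Int)) : List Int × Int :=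
  (PySem.List.enumerate (pvHist n edges)).foldl
    (fun (p : List Int × Int) dc => (p.1.set dc.1.toNat p.2, p.2 + dc.2))
    (List.replicate (2 * edges.length + 1) 0, 1)
-- val = [0]*n; for v in range(n): val[v] = next_rank[degree[v]]; next_rank[degree[v]] += 1
def pvScan (n : Int) (edges : List (List Int)) : List Int × List Int :=
  (PySem.List.pyRange 0 n 1).foldl
    (fun (p : List Int × List Int) v =>
      (p.1.set v.toNat (p.2.getD (pvKey n edges v).toNat 0),
       p.2.set (pvKey n edges v).toNat (p.2.getD (pvKey n edges v).toNat 0 + 1)))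
    (List.replicate n.toNat 0, (pvNextRank n edges).1)

def maximum_sum_of_edge_values_alt (n : Int) (edges : List (List Int)) : Int :=
  (edges.map
    (fun e => PySem.List.pyGetD (pvScan n edges).1 (e.getD 0 0) 0 *
              PySem.List.pyGetD (pvScan n edges).1 (e.getD 1 0) 0)).sum

-- ===== PRECONDITION & SPEC =====
-- Pre_ excludes exactly the inputs on which the Python A raises: an edge whose length is not 2
-- (ValueError at unpacking) or an endpoint outside [-n, n) (IndexError); with no edges at all
-- any n (even negative, where [0]*n is empty) returns 0 and is admitted.
def Pre_maximum_sum_of_edge_values (n : Int) (edges : List (List Int)) : Prop :=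
  (0 ≤ n ∨ edges = []) ∧ ∀ e ∈ edges, e.length = 2 ∧ ∀ x ∈ e, -n ≤ x ∧ x < n
instance (n : Int) (edges : List (List Int)) : Decidable (Pre_maximum_sum_of_edge_values n edges) := by
  unfold Pre_maximum_sum_of_edge_values; infer_instance
def pvWitness_maximum_sum_of_edge_values : Int × List (List Int) := (3, [[0, 1], [1, 2]])

def Spec_maximum_sum_of_edge_values (n : Int) (edges : List (List Int)) (out : Int) : Prop :=
  out = maximum_sum_of_edge_values_alt n edges
instance (n : Int) (edges : List (List Int)) (out : Int) : Decidable (Spec_maximum_sum_of_edge_values n edges out) := by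
  unfold Spec_maximum_sum_of_edge_values; infer_instance

-- ===== CLAIM (what is proved, stated in full; the proofs are below) =====
def Claim_equal_maximum_sum_of_edge_values : Prop := ∀ (n : Int) (edges : List (List Int)), Dom_maximum_sum_of_edge_values n edges → Pre_maximum_sum_of_edge_values n edges → Spec_maximum_sum_of_edge_values n edges (maximum_sum_of_edge_values n edges)

-- ===== LEMMAS AND PROOFS =====

-- the strict "stable order": key strictly increasing, ties broken by the (distinct) values
def pvR (key : Int → Int) (a b : Int) : Prop := key a < key b ∨ (key a = key b ∧ a < b)

-- the rank-assignment loop A's scatter performs, as one recursion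
def pvAssign : List Int → Int → List Int → List Int
  | [],     _, nv => nv
  | x :: l, c, nv => pvAssign l (c + 1) (nv.set x.toNat c)

-- node u's degree, value and counting quantities, Nat-indexed (proof-side only)
def pvKeyN (n : Int) (edges : List (List Int)) (u : Nat) : Int := (pvDeg n edges).getD u 0
def pvCntLt (n : Int) (edges : List (List Int)) (d : Nat) : Int :=
  ((List.range n.toNat).countP (fun u => decide (pvKeyN n edges u < (d : Int))) : Nat)
def pvCntEq (n : Int) (edges : List (List Int)) (d : Nat) (m : Nat) : Int :=
  ((List.range m).countP (fun u => decide (pvKeyN n edges u = (d : Int))) : Nat)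
def pvRankN (n : Int) (edges : List (List Int)) (v : Nat) : Int :=
  1 + ((List.range n.toNat).countP
        (fun u => decide (pvKeyN n edges u < pvKeyN n edges v ∨
                          (pvKeyN n edges u = pvKeyN n edges v ∧ u < v))) : Nat)

-- ---- stability of PySem.List.sorted on a strictly increasing input ----
theorem pv_insertBy_pairwise (key : Int → Int) (x : Int) (acc : List Int)
    (h : acc.Pairwise (pvR key)) (hlt : ∀ y ∈ acc, y < x) :
    (PySem.List.insertBy (fun a b => decide (key a < key b)) x acc).Pairwise (pvR key) := by
  induction acc with
  | nil => simp [PySem.List.insertBy, pvR]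
  | cons y ys ih =>
    rcases List.pairwise_cons.mp h with ⟨hy, hys⟩
    simp only [PySem.List.insertBy]
    by_cases hk : key x < key y
    · rw [if_pos (by simp [hk])]
      refine List.pairwise_cons.mpr ⟨?_, h⟩
      intro z hz
      rcases List.mem_cons.mp hz with rfl | hz
      · exact Or.inl hk
      · rcases hy z hz with h' | ⟨h', _⟩ <;> exact Or.inl (by omega)
    · rw [if_neg (by simp [hk])]
      refine List.pairwise_cons.mpr
        ⟨?_, ih hys (fun z hz => hlt z (List.mem_cons_of_mem _ hz))⟩
      intro z hz
      rcases (PySem.List.mem_insertBy _ _ _ _).mp hz with rfl | hz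
      · rcases lt_or_eq_of_le (not_lt.mp hk) with h' | h'
        · exact Or.inl h'
        · exact Or.inr ⟨h', hlt y (List.mem_cons_self)⟩
      · exact hy z hz

theorem pv_foldl_insert_pairwise (key : Int → Int) (xs : List Int) :
    ∀ acc : List Int, acc.Pairwise (pvR key) → (∀ y ∈ acc, ∀ x ∈ xs, y < x) →
    xs.Pairwise (· < ·) →
    (xs.foldl (fun acc x => PySem.List.insertBy (fun a b => decide (key a < key b)) x acc) acc).Pairwise (pvR key) := by
  induction xs with
  | nil => intro acc h _ _; simpa using h
  | cons x xs ih =>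
    intro acc hacc hcross hxs
    rcases List.pairwise_cons.mp hxs with ⟨hx, hxs'⟩
    simp only [List.foldl_cons]
    refine ih _ ?_ ?_ hxs'
    · exact pv_insertBy_pairwise key x acc hacc
        (fun y hy => hcross y hy x (List.mem_cons_self))
    · intro y hy z hz
      rcases (PySem.List.mem_insertBy _ _ _ _).mp hy with rfl | hy
      · exact hx z hz
      · exact hcross y hy z (List.mem_cons_of_mem _ hz)

theorem pv_sorted_pairwise_stable (key : Int → Int) (xs : List Int)
    (hxs : xs.Pairwise (· < ·)) :
    (PySem.List.sorted xs key false).Pairwise (pvR key) := by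
  rw [PySem.List.sorted_eq_foldl_insertBy]
  exact pv_foldl_insert_pairwise key xs [] (by simp) (by simp) hxs

-- ---- getD/set helpers ----
theorem pv_getD_set_self {α : Type} (l : List α) (i : Nat) (w d : α) (h : i < l.length) :
    (l.set i w).getD i d = w := by
  simp [List.getD_eq_getElem?_getD, h]

theorem pv_getD_set_ne {α : Type} (l : List α) (i j : Nat) (w d : α) (h : i ≠ j) :
    (l.set i w).getD j d = l.getD j d := by
  simp [List.getD_eq_getElem?_getD, h]

-- ---- degree-array facts ----
theorem pvBump_getD_nonneg (n : Int) (d : List Int) (i : Int) (k : Nat)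
    (h : ∀ j, 0 ≤ d.getD j 0) : 0 ≤ (pvBump n d i).getD k 0 := by
  unfold pvBump
  by_cases hlen : pvIdx n i < d.length
  · by_cases hk : pvIdx n i = k
    · rw [hk, pv_getD_set_self _ _ _ _ (hk ▸ hlen)]
      have := h k; omega
    · rw [pv_getD_set_ne _ _ _ _ _ hk]; exact h k
  · rw [List.set_eq_of_length_le (by omega)]; exact h k

theorem pvBump_getD_le (n : Int) (d : List Int) (i : Int) (k : Nat) :
    (pvBump n d i).getD k 0 ≤ d.getD k 0 + 1 := by
  unfold pvBump
  by_cases hlen : pvIdx n i < d.length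
  · by_cases hk : pvIdx n i = k
    · rw [hk, pv_getD_set_self _ _ _ _ (hk ▸ hlen)]
    · rw [pv_getD_set_ne _ _ _ _ _ hk]; omega
  · rw [List.set_eq_of_length_le (by omega)]; omega

theorem pvDeg_foldl_nonneg (n : Int) (l : List (List Int)) (d : List Int)
    (h : ∀ j, 0 ≤ d.getD j 0) :
    ∀ k, 0 ≤ (l.foldl (fun d e => pvBump n (pvBump n d (e.getD 0 0)) (e.getD 1 0)) d).getD k 0 := by
  induction l generalizing d with
  | nil => exact h
  | cons e l ih =>
    simp only [List.foldl_cons]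
    exact ih _ (fun j => pvBump_getD_nonneg n _ _ j (fun j' => pvBump_getD_nonneg n _ _ j' h))

theorem pvDeg_foldl_le (n : Int) (l : List (List Int)) (d : List Int) (k : Nat) :
    (l.foldl (fun d e => pvBump n (pvBump n d (e.getD 0 0)) (e.getD 1 0)) d).getD k 0
      ≤ d.getD k 0 + 2 * l.length := by
  induction l generalizing d with
  | nil => simp
  | cons e l ih =>
    simp only [List.foldl_cons, List.length_cons]
    calc (l.foldl _ (pvBump n (pvBump n d (e.getD 0 0)) (e.getD 1 0))).getD k 0
        ≤ (pvBump n (pvBump n d (e.getD 0 0)) (e.getD 1 0)).getD k 0 + 2 * l.length := ih _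
      _ ≤ ((pvBump n d (e.getD 0 0)).getD k 0 + 1) + 2 * l.length := by
          have := pvBump_getD_le n (pvBump n d (e.getD 0 0)) (e.getD 1 0) k; omega
      _ ≤ d.getD k 0 + 2 * (l.length + 1) := by
          have := pvBump_getD_le n d (e.getD 0 0) k; omega

theorem pvDeg_getD_nonneg (n : Int) (edges : List (List Int)) (k : Nat) :
    0 ≤ (pvDeg n edges).getD k 0 := by
  refine pvDeg_foldl_nonneg n edges _ (fun j => ?_) k
  rw [List.getD_eq_getElem?_getD, List.getElem?_replicate]
  split <;> simp

theorem pvDeg_getD_le (n : Int) (edges : List (List Int)) (k : Nat) :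
    (pvDeg n edges).getD k 0 ≤ 2 * edges.length := by
  have := pvDeg_foldl_le n edges (List.replicate n.toNat 0) k
  have hz : (List.replicate n.toNat (0 : Int)).getD k 0 = 0 := by
    rw [List.getD_eq_getElem?_getD, List.getElem?_replicate]
    split <;> rfl
  unfold pvDeg
  omega

theorem pvDeg_length (n : Int) (edges : List (List Int)) :
    (pvDeg n edges).length = n.toNat := by
  have h : ∀ (l : List (List Int)) (d : List Int),
      (l.foldl (fun d e => pvBump n (pvBump n d (e.getD 0 0)) (e.getD 1 0)) d).length = d.length := by
    intro l
    induction l with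
    | nil => intro d; rfl
    | cons e t ih => intro d; rw [List.foldl_cons, ih]; simp [pvBump]
  rw [pvDeg, h]; simp

-- ---- A's assignment loop ----
theorem pv_pyGetD_values (n i : Int) (h0 : 0 ≤ i) (h1 : i < n) :
    PySem.List.pyGetD (pvValues n) i 0 = i + 1 := by
  rw [pvValues, PySem.List.pyGetD_of_nonneg _ _ h0, PySem.List.pyRange_one]
  rw [List.getD_eq_getElem?_getD, List.getElem?_map,
    List.getElem?_range (by omega : i.toNat < (n + 1 - 1).toNat)]
  simp only [Option.map_some, Option.getD_some]
  omega

theorem pv_enumerate_foldl_assign (n : Int) (l : List Int) (off : Int) (nv : List Int)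
    (h0 : 0 ≤ off) (h1 : off + l.length ≤ n) :
    (PySem.List.enumerate l off).foldl
      (fun nv p => nv.set p.2.toNat (PySem.List.pyGetD (pvValues n) p.1 0)) nv
    = pvAssign l (off + 1) nv := by
  induction l generalizing off nv with
  | nil => simp [PySem.List.enumerate, pvAssign]
  | cons x l ih =>
    rw [PySem.List.enumerate_cons]
    simp only [List.foldl_cons, List.length_cons] at *
    rw [pv_pyGetD_values n off h0 (by push_cast at h1; omega)]
    rw [ih (off + 1) _ (by omega) (by push_cast at h1 ⊢; omega)]
    simp [pvAssign]

theorem pvAssign_length (L : List Int) (c : Int) (a : List Int) :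
    (pvAssign L c a).length = a.length := by
  induction L generalizing c a with
  | nil => rfl
  | cons x t ih => simp [pvAssign, ih]

theorem pvAssign_getD_notin (L : List Int) (c : Int) (a : List Int) (j : Nat)
    (h : ∀ w ∈ L, w.toNat ≠ j) :
    (pvAssign L c a).getD j 0 = a.getD j 0 := by
  induction L generalizing c a with
  | nil => rfl
  | cons x t ih =>
    simp only [pvAssign]
    rw [ih _ _ (fun w hw => h w (List.mem_cons_of_mem _ hw)),
        pv_getD_set_ne _ _ _ _ _ (h x List.mem_cons_self)]

theorem pvAssign_rank (key : Int → Int) (v : Int) :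
    ∀ (L : List Int) (c : Int) (a : List Int),
    L.Pairwise (pvR key) → (∀ w ∈ L, 0 ≤ w) → v ∈ L → v.toNat < a.length →
    (pvAssign L c a).getD v.toNat 0
      = c + (L.countP (fun w => decide (key w < key v ∨ (key w = key v ∧ w < v))) : Nat) := by
  intro L
  induction L with
  | nil => intro c a _ _ hv _; cases hv
  | cons x t ih =>
    intro c a hp hnn hv hb
    rcases List.pairwise_cons.mp hp with ⟨hx, ht⟩
    by_cases hvx : v = x
    · subst hvx
      have hzero : t.countP (fun w => decide (key w < key v ∨ (key w = key v ∧ w < v))) = 0 := by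
        refine List.countP_eq_zero.mpr (fun w hw => ?_)
        have h1 := hx w hw
        unfold pvR at h1
        simp only [decide_eq_true_eq]
        omega
      have hself : (decide (key v < key v ∨ (key v = key v ∧ v < v))) = false := by
        simp only [decide_eq_false_iff_not]
        omega
      simp only [pvAssign]
      rw [pvAssign_getD_notin t (c + 1) _ v.toNat (fun w hw => ?_),
          pv_getD_set_self _ _ _ _ hb]
      · rw [List.countP_cons, hzero, hself]
        norm_num
      · have h1 := hx w hw
        have h2 := hnn w (List.mem_cons_of_mem _ hw)
        have h3 := hnn v List.mem_cons_self
        unfold pvR at h1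
        have hne : w ≠ v := by intro e; rw [e] at h1; omega
        omega
    · have hvt : v ∈ t := by
        rcases List.mem_cons.mp hv with h' | h'
        · exact absurd h' hvx
        · exact h'
      simp only [pvAssign]
      rw [ih (c + 1) _ ht (fun w hw => hnn w (List.mem_cons_of_mem _ hw)) hvt
            (by rw [List.length_set]; exact hb)]
      have hxv : (decide (key x < key v ∨ (key x = key v ∧ x < v))) = true := by
        have h1 := hx v hvt
        unfold pvR at h1
        simp only [decide_eq_true_eq]
        omega
      rw [List.countP_cons, hxv]
      push_cast
      simp only [if_true]
      ring

-- ---- generic counting helpers ----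
theorem pv_countP_disjoint_or {α : Type} (l : List α) (p q : α → Bool)
    (h : ∀ a ∈ l, ¬(p a = true ∧ q a = true)) :
    l.countP (fun a => p a || q a) = l.countP p + l.countP q := by
  induction l with
  | nil => rfl
  | cons x t ih =>
    simp only [List.countP_cons]
    rw [ih (fun a ha => h a (List.mem_cons_of_mem _ ha))]
    have := h x List.mem_cons_self
    by_cases hp : p x = true <;> by_cases hq : q x = true <;> simp [hp, hq] at * <;> omega

theorem pv_countP_range_restrict (p : Nat → Bool) (m N : Nat) (hm : m ≤ N)
    (h : ∀ u, p u = true → u < m) :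
    (List.range N).countP p = (List.range m).countP p := by
  have : N = m + (N - m) := by omega
  rw [this, List.range_add, List.countP_append]
  have : ((List.range (N - m)).map (m + ·)).countP p = 0 := by
    refine List.countP_eq_zero.mpr (fun w hw => ?_)
    rcases List.mem_map.mp hw with ⟨k, _, rfl⟩
    intro hp
    exact absurd (h _ hp) (by omega)
  omega

theorem pv_list_eq_map_range (l : List Int) :
    l = (List.range l.length).map (fun i => l.getD i 0) := by
  apply List.ext_getElem
  · simp
  · intro i h1 h2
    simp [List.getD_eq_getElem?_getD, List.getElem?_eq_getElem h1]

-- ---- the histogram fold ----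
theorem pv_foldl_count_getD (l : List Int) (b : List Int) (j : Nat)
    (hin : ∀ x ∈ l, x.toNat < b.length) :
    (l.foldl (fun h d => h.set d.toNat (h.getD d.toNat 0 + 1)) b).getD j 0
      = b.getD j 0 + (l.countP (fun d => d.toNat == j) : Nat) := by
  induction l generalizing b with
  | nil => simp
  | cons x t ih =>
    simp only [List.foldl_cons, List.countP_cons]
    rw [ih _ (fun z hz => by rw [List.length_set]; exact hin z (List.mem_cons_of_mem _ hz))]
    by_cases hx : x.toNat = j
    · rw [← hx, pv_getD_set_self _ _ _ _ (hin x List.mem_cons_self)]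
      simp [hx]
      ring
    · rw [pv_getD_set_ne _ _ _ _ _ hx]
      simp [hx]

theorem pv_foldl_count_length (l : List Int) (b : List Int) :
    (l.foldl (fun h d => h.set d.toNat (h.getD d.toNat 0 + 1)) b).length = b.length := by
  induction l generalizing b with
  | nil => rfl
  | cons x t ih => rw [List.foldl_cons, ih, List.length_set]

theorem pvHist_length (n : Int) (edges : List (List Int)) :
    (pvHist n edges).length = 2 * edges.length + 1 := by
  rw [pvHist, pv_foldl_count_length]; simp

theorem pv_toNat_beq (x : Int) (j : Nat) (h : 0 ≤ x) :
    (x.toNat == j) = decide (x = (j : Int)) := by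
  by_cases hx : x = (j : Int)
  · subst hx; simp
  · have h2 : x.toNat ≠ j := by omega
    simp [hx, h2]

theorem pv_countP_eq_range (l : List Int) (p : Int → Bool) :
    l.countP p = (List.range l.length).countP (fun i => p (l.getD i 0)) := by
  conv_lhs => rw [pv_list_eq_map_range l]
  rw [List.countP_map]
  rfl

theorem pvHist_getD (n : Int) (edges : List (List Int)) (j : Nat) :
    (pvHist n edges).getD j 0
      = ((List.range n.toNat).countP (fun u => decide (pvKeyN n edges u = (j : Int))) : Nat) := by
  have hin : ∀ x ∈ pvDeg n edges, x.toNat < (List.replicate (2 * edges.length + 1) (0 : Int)).length := by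
    intro x hx
    rcases List.mem_iff_getElem.mp hx with ⟨i, hi, rfl⟩
    have h1 := pvDeg_getD_nonneg n edges i
    have h2 := pvDeg_getD_le n edges i
    rw [List.getD_eq_getElem _ _ hi] at h1 h2
    simp only [List.length_replicate]
    omega
  rw [pvHist, pv_foldl_count_getD _ _ _ hin]
  have hz : (List.replicate (2 * edges.length + 1) (0 : Int)).getD j 0 = 0 := by
    rw [List.getD_eq_getElem?_getD, List.getElem?_replicate]
    split <;> rfl
  rw [hz, zero_add, pv_countP_eq_range, pvDeg_length]
  congr 1
  refine List.countP_congr (fun u hu => ?_)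
  have h1 := pvDeg_getD_nonneg n edges u
  simp only [pvKeyN]
  rw [pv_toNat_beq _ j h1]
  exact Iff.rfl

-- ---- the prefix-sum (enumerate) fold ----
theorem pv_enumfold (h : List Int) :
    ∀ (k : Nat) (a : List Int) (run : Int) (j : Nat), j < a.length →
    ((PySem.List.enumerate h (k : Int)).foldl
        (fun (p : List Int × Int) dc => (p.1.set dc.1.toNat p.2, p.2 + dc.2)) (a, run)).1.getD j 0
      = if k ≤ j ∧ j < k + h.length then run + ((h.take (j - k)).sum) else a.getD j 0 := by
  induction h with
  | nil =>
    intro k a run j hj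
    rw [PySem.List.enumerate_nil, List.foldl_nil,
        if_neg (by simp only [List.length_nil]; omega)]
  | cons c t ih =>
    intro k a run j hj
    rw [PySem.List.enumerate_cons, List.foldl_cons]
    have hcast : (k : Int) + 1 = ((k + 1 : Nat) : Int) := by push_cast; ring
    simp only [Int.toNat_natCast]
    rw [hcast, ih (k + 1) (a.set k run) (run + c) j (by rw [List.length_set]; exact hj)]
    by_cases h1 : j = k
    · subst h1
      rw [if_neg (by omega), if_pos (by simp only [List.length_cons]; omega),
          pv_getD_set_self _ _ _ _ hj]
      simp
    · by_cases h2 : k + 1 ≤ j ∧ j < k + 1 + t.length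
      · rw [if_pos h2, if_pos (by simp only [List.length_cons]; omega)]
        have h3 : j - k = (j - (k + 1)) + 1 := by omega
        rw [h3, List.take_succ_cons, List.sum_cons]
        ring
      · rw [if_neg h2, if_neg (by simp only [List.length_cons]; omega),
            pv_getD_set_ne _ _ _ _ _ (by omega)]

theorem pv_decide_lt_succ (x : Int) (d : Nat) :
    decide (x < ((d + 1 : Nat) : Int)) = (decide (x < (d : Int)) || decide (x = (d : Int))) := by
  push_cast
  by_cases h1 : x < (d : Int)
  · have h2 : x < (d : Int) + 1 := by omega
    simp [h1, h2]
  · by_cases h2 : x = (d : Int)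
    · subst h2; simp
    · have h3 : ¬ x < (d : Int) + 1 := by omega
      simp [h1, h2, h3]

theorem pv_hist_take_sum (n : Int) (edges : List (List Int)) (d : Nat)
    (hd : d ≤ 2 * edges.length + 1) :
    ((pvHist n edges).take d).sum = pvCntLt n edges d := by
  induction d with
  | zero =>
    simp only [List.take_zero, List.sum_nil, pvCntLt]
    have : (List.range n.toNat).countP (fun u => decide (pvKeyN n edges u < ((0 : Nat) : Int))) = 0 := by
      refine List.countP_eq_zero.mpr (fun u _ => ?_)
      have := pvDeg_getD_nonneg n edges u
      simp only [pvKeyN, decide_eq_true_eq]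
      omega
    rw [this]
    rfl
  | succ d ihd =>
    have hd' : d < (pvHist n edges).length := by rw [pvHist_length]; omega
    rw [List.sum_take_succ _ _ hd', ihd (by omega),
        ← List.getD_eq_getElem _ 0 hd', pvHist_getD]
    have hsplit : (List.range n.toNat).countP (fun u => decide (pvKeyN n edges u < ((d + 1 : Nat) : Int)))
        = (List.range n.toNat).countP (fun u => decide (pvKeyN n edges u < (d : Int)))
          + (List.range n.toNat).countP (fun u => decide (pvKeyN n edges u = (d : Int))) := by
      rw [← pv_countP_disjoint_or _ _ _ (fun u _ => by
        simp only [decide_eq_true_eq]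
        omega)]
      refine List.countP_congr (fun u _ => ?_)
      rw [pv_decide_lt_succ]
    unfold pvCntLt
    rw [hsplit]
    push_cast
    ring

theorem pvNextRank_getD (n : Int) (edges : List (List Int)) (d : Nat)
    (hd : d < 2 * edges.length + 1) :
    (pvNextRank n edges).1.getD d 0 = 1 + pvCntLt n edges d := by
  have h := pv_enumfold (pvHist n edges) 0 (List.replicate (2 * edges.length + 1) 0) 1 d
    (by simp; omega)
  rw [pvNextRank]
  rw [show ((0 : Nat) : Int) = (0 : Int) from rfl] at h
  rw [h, if_pos (by rw [pvHist_length]; omega), Nat.sub_zero,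
      pv_hist_take_sum n edges d (by omega)]

theorem pv_enumfold_length (h : List Int) :
    ∀ (k : Int) (a : List Int) (run : Int),
    ((PySem.List.enumerate h k).foldl
        (fun (p : List Int × Int) dc => (p.1.set dc.1.toNat p.2, p.2 + dc.2)) (a, run)).1.length
      = a.length := by
  induction h with
  | nil => intro k a run; rw [PySem.List.enumerate_nil, List.foldl_nil]
  | cons c t ih =>
    intro k a run
    rw [PySem.List.enumerate_cons, List.foldl_cons, ih, List.length_set]

theorem pvNextRank_length (n : Int) (edges : List (List Int)) :
    (pvNextRank n edges).1.length = 2 * edges.length + 1 := by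
  rw [pvNextRank, pv_enumfold_length, List.length_replicate]

theorem pvKey_natCast (n : Int) (edges : List (List Int)) (i : Nat) :
    pvKey n edges (i : Int) = pvKeyN n edges i := by
  rw [pvKey, pvKeyN, PySem.List.pyGetD_natCast]

-- ---- the scan ----
-- proof-side restatement of B's scan with Nat indices
def pvScanGo (n : Int) (edges : List (List Int)) (m : Nat) : List Int × List Int :=
  (List.range m).foldl
    (fun (p : List Int × List Int) i =>
      (p.1.set i (p.2.getD (pvKeyN n edges i).toNat 0),
       p.2.set (pvKeyN n edges i).toNat (p.2.getD (pvKeyN n edges i).toNat 0 + 1)))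
    (List.replicate n.toNat 0, (pvNextRank n edges).1)

theorem pvScan_eq_go (n : Int) (edges : List (List Int)) :
    pvScan n edges = pvScanGo n edges n.toNat := by
  rw [pvScan, pvScanGo, PySem.List.pyRange_one, Int.sub_zero, List.foldl_map]
  have hf : (fun (p : List Int × List Int) (k : Nat) =>
      (p.1.set (0 + (k : Int)).toNat (p.2.getD (pvKey n edges (0 + (k : Int))).toNat 0),
       p.2.set (pvKey n edges (0 + (k : Int))).toNat
         (p.2.getD (pvKey n edges (0 + (k : Int))).toNat 0 + 1)))
    = (fun (p : List Int × List Int) (i : Nat) =>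
      (p.1.set i (p.2.getD (pvKeyN n edges i).toNat 0),
       p.2.set (pvKeyN n edges i).toNat (p.2.getD (pvKeyN n edges i).toNat 0 + 1))) := by
    funext p k
    rw [zero_add, pvKey_natCast, Int.toNat_natCast]
  rw [hf]

theorem pvCntEq_succ (n : Int) (edges : List (List Int)) (d m : Nat) :
    pvCntEq n edges d (m + 1)
      = pvCntEq n edges d m + (if pvKeyN n edges m = (d : Int) then 1 else 0) := by
  unfold pvCntEq
  rw [List.range_succ, List.countP_append, List.countP_cons, List.countP_nil]
  by_cases h : pvKeyN n edges m = (d : Int)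
  · simp [h]
  · simp [h]

theorem pvScanGo_inv (n : Int) (edges : List (List Int)) :
    ∀ m : Nat, m ≤ n.toNat →
    (pvScanGo n edges m).1.length = n.toNat ∧
    (pvScanGo n edges m).2.length = 2 * edges.length + 1 ∧
    (∀ u, u < m → (pvScanGo n edges m).1.getD u 0 = pvRankN n edges u) ∧
    (∀ d, d < 2 * edges.length + 1 →
      (pvScanGo n edges m).2.getD d 0 = 1 + pvCntLt n edges d + pvCntEq n edges d m) := by
  intro m
  induction m with
  | zero =>
    intro _
    refine ⟨by simp [pvScanGo], by simp [pvScanGo, pvNextRank_length], fun u hu => absurd hu (by omega), fun d hd => ?_⟩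
    have hz : pvCntEq n edges d 0 = 0 := by simp [pvCntEq]
    rw [hz]
    simp only [pvScanGo, List.range_zero, List.foldl_nil]
    rw [pvNextRank_getD n edges d hd]
    ring
  | succ m ih =>
    intro hm
    obtain ⟨hL1, hL2, hv, hnr⟩ := ih (by omega)
    have hknn : 0 ≤ pvKeyN n edges m := pvDeg_getD_nonneg n edges m
    have hkle := pvDeg_getD_le n edges m
    have hkK : (pvKeyN n edges m).toNat < 2 * edges.length + 1 := by
      unfold pvKeyN; omega
    have hgo : pvScanGo n edges (m + 1)
        = ((pvScanGo n edges m).1.set m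
             ((pvScanGo n edges m).2.getD (pvKeyN n edges m).toNat 0),
           (pvScanGo n edges m).2.set (pvKeyN n edges m).toNat
             ((pvScanGo n edges m).2.getD (pvKeyN n edges m).toNat 0 + 1)) := by
      rw [pvScanGo, List.range_succ, List.foldl_append, List.foldl_cons, List.foldl_nil]
      rfl
    have hkcast : ((pvKeyN n edges m).toNat : Int) = pvKeyN n edges m :=
      Int.toNat_of_nonneg hknn
    have hassigned : (pvScanGo n edges m).2.getD (pvKeyN n edges m).toNat 0
        = 1 + pvCntLt n edges (pvKeyN n edges m).toNat
            + pvCntEq n edges (pvKeyN n edges m).toNat m := hnr _ hkK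
    have hrank : pvRankN n edges m
        = 1 + pvCntLt n edges (pvKeyN n edges m).toNat
            + pvCntEq n edges (pvKeyN n edges m).toNat m := by
      rw [pvRankN]
      have hsplit : (List.range n.toNat).countP
            (fun u => decide (pvKeyN n edges u < pvKeyN n edges m ∨
                              (pvKeyN n edges u = pvKeyN n edges m ∧ u < m)))
          = (List.range n.toNat).countP
              (fun u => decide (pvKeyN n edges u < pvKeyN n edges m))
            + (List.range n.toNat).countP
              (fun u => decide (pvKeyN n edges u = pvKeyN n edges m) && decide (u < m)) := by
        rw [← pv_countP_disjoint_or _ _ _ (fun u _ => by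
          simp only [Bool.and_eq_true, decide_eq_true_eq]
          omega)]
        refine List.countP_congr (fun u _ => ?_)
        simp only [decide_eq_true_eq, Bool.or_eq_true, Bool.and_eq_true]
      rw [hsplit]
      have h1 : (List.range n.toNat).countP
            (fun u => decide (pvKeyN n edges u < pvKeyN n edges m))
          = (List.range n.toNat).countP
            (fun u => decide (pvKeyN n edges u < ((pvKeyN n edges m).toNat : Int))) := by
        refine List.countP_congr (fun u _ => ?_)
        rw [hkcast]
      have h2 : (List.range n.toNat).countP
            (fun u => decide (pvKeyN n edges u = pvKeyN n edges m) && decide (u < m))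
          = (List.range m).countP
            (fun u => decide (pvKeyN n edges u = ((pvKeyN n edges m).toNat : Int))) := by
        rw [pv_countP_range_restrict _ m n.toNat (by omega) (fun u hu => by
          simp only [Bool.and_eq_true, decide_eq_true_eq] at hu
          exact hu.2)]
        refine List.countP_congr (fun u hu => ?_)
        have hum : u < m := List.mem_range.mp hu
        rw [hkcast]
        simp only [Bool.and_eq_true, decide_eq_true_eq]
        constructor
        · exact fun h => h.1
        · exact fun h => ⟨h, hum⟩
      rw [h1, h2]
      unfold pvCntLt pvCntEq
      push_cast
      ring
    refine ⟨?_, ?_, ?_, ?_⟩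
    · rw [hgo]; simp only [List.length_set]; exact hL1
    · rw [hgo]; simp only [List.length_set]; exact hL2
    · intro u hu
      rw [hgo]
      by_cases hum : u = m
      · subst hum
        simp only
        rw [pv_getD_set_self _ _ _ _ (by rw [hL1]; omega), hassigned, hrank]
      · simp only
        rw [pv_getD_set_ne _ _ _ _ _ (fun e => hum e.symm)]
        exact hv u (by omega)
    · intro d hd
      rw [hgo]
      simp only
      rw [pvCntEq_succ]
      by_cases hdk : (pvKeyN n edges m).toNat = d
      · subst hdk
        rw [pv_getD_set_self _ _ _ _ (by rw [hL2]; exact hkK), hassigned,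
            if_pos hkcast.symm]
        ring
      · rw [pv_getD_set_ne _ _ _ _ _ hdk, hnr d hd,
            if_neg (fun e => hdk (by omega))]
        ring

theorem pvScan_spec (n : Int) (edges : List (List Int)) :
    (pvScan n edges).1.length = n.toNat ∧
    ∀ u < n.toNat, (pvScan n edges).1.getD u 0 = pvRankN n edges u := by
  rw [pvScan_eq_go]
  obtain ⟨h1, _, h3, _⟩ := pvScanGo_inv n edges n.toNat le_rfl
  exact ⟨h1, h3⟩

-- ---- A's node_values, pointwise ----
theorem pvNodes_eq_assign (n : Int) (edges : List (List Int)) (hn : 0 ≤ n) :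
    pvNodeValues n edges = pvAssign (pvNodes n edges) 1 (List.replicate n.toNat 0) := by
  have hlen : (pvNodes n edges).length = n.toNat := by
    rw [pvNodes, PySem.List.length_sorted, PySem.List.length_pyRange_one]
    omega
  rw [pvNodeValues, pv_enumerate_foldl_assign n _ 0 _ le_rfl (by rw [hlen]; omega), zero_add]

theorem pvNodeValues_spec (n : Int) (edges : List (List Int)) (hn : 0 ≤ n) :
    (pvNodeValues n edges).length = n.toNat ∧
    ∀ u < n.toNat, (pvNodeValues n edges).getD u 0 = pvRankN n edges u := by
  rw [pvNodes_eq_assign n edges hn]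
  constructor
  · rw [pvAssign_length, List.length_replicate]
  intro u hu
  have hvmem : ((u : Nat) : Int) ∈ PySem.List.pyRange 0 n 1 := by
    rw [PySem.List.mem_pyRange_one]
    omega
  have hperm : (pvNodes n edges).Perm (PySem.List.pyRange 0 n 1) :=
    PySem.List.sorted_perm _ _ _
  have hr := pvAssign_rank (pvKey n edges) (u : Int) (pvNodes n edges) 1
    (List.replicate n.toNat 0)
    (pv_sorted_pairwise_stable _ _ (PySem.List.pairwise_lt_pyRange_one 0 n))
    (fun w hw => ((PySem.List.mem_pyRange_one).mp ((PySem.List.mem_sorted _ _ _ _).mp hw)).1)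
    ((PySem.List.mem_sorted _ _ _ _).mpr hvmem)
    (by simp; omega)
  rw [Int.toNat_natCast] at hr
  rw [hr, hperm.countP_eq, PySem.List.pyRange_one]
  simp only [Int.sub_zero, List.countP_map]
  rw [pvRankN]
  congr 1
  refine congrArg _ (List.countP_congr (fun i _ => ?_))
  show (decide (pvKey n edges (0 + (i : Int)) < pvKey n edges (u : Int) ∨
      (pvKey n edges (0 + (i : Int)) = pvKey n edges (u : Int) ∧ 0 + (i : Int) < (u : Int)))) = true ↔ _
  rw [zero_add, pvKey_natCast, pvKey_natCast]
  simp only [decide_eq_true_eq]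
  constructor <;> intro h <;>
    (rcases h with h | ⟨h1, h2⟩
     · exact Or.inl h
     · exact Or.inr ⟨h1, by omega⟩)

-- ---- sum shapes ----
theorem pv_foldl_add_eq_map_sum (f : List Int → Int) (edges : List (List Int)) (s : Int) :
    edges.foldl (fun s e => s + f e) s = s + (edges.map f).sum := by
  induction edges generalizing s with
  | nil => simp
  | cons e l ih => simp only [List.foldl_cons, List.map_cons, List.sum_cons, ih]; ring

-- ---- main ----
theorem pv_nodeValues_eq (n : Int) (edges : List (List Int)) (hn : 0 ≤ n) :
    pvNodeValues n edges = (pvScan n edges).1 := by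
  obtain ⟨hl1, hv1⟩ := pvNodeValues_spec n edges hn
  obtain ⟨hl2, hv2⟩ := pvScan_spec n edges
  apply List.ext_getElem (by rw [hl1, hl2])
  intro i h1 h2
  have e1 := hv1 i (by omega)
  have e2 := hv2 i (by omega)
  rw [List.getD_eq_getElem _ _ h1] at e1
  rw [List.getD_eq_getElem _ _ h2] at e2
  rw [e1, e2]

-- ===== VERDICT (by name: the statement is the Claim_ definition above) =====
theorem maximum_sum_of_edge_values_spec : Claim_equal_maximum_sum_of_edge_values := by
  unfold Claim_equal_maximum_sum_of_edge_values
  intro n edges _ hpre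
  unfold Spec_maximum_sum_of_edge_values
  rcases hpre.1 with hn | rfl
  · unfold maximum_sum_of_edge_values maximum_sum_of_edge_values_alt
    rw [pv_nodeValues_eq n edges hn]
    exact pv_foldl_add_eq_map_sum _ edges 0 |>.trans (by simp)
  · rfl
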